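-- pv_equiv track=rewrite | github.com/pypi-data/pypi-mirror-383 | packages/random-color-hex/random_color_hex-2.1-py3-none-any.whl/random_color_hex/random_color_hex.py | MatchesMask
-- ===== SOURCE A (Python) =====
-- def MatchesMask(hex6, mask):
--     """Return True if the 6-char hex string matches a mask.
--
--     Mask semantics:
--       - 'X' → any hex digit (0–F).
--       - 'H' → high nibble (8–F).
--       - other hex characters → must match exactly.
--
--     Both inputs may include or omit the leading '#'.
--     """
--     hex6=hex6.upper().lstrip('#')
--     mask=mask.upper().lstrip('#')
--     if len(hex6)!=6 or len(mask)!=6: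
--         return False
--
--     def ok(h, m):
--         if m=='X':
--             return h in '0123456789ABCDEF'
--         if m=='H':
--             return h in '89ABCDEF'
--         return h==m
--
--     return all(ok(h, m) for h, m in zip(hex6, mask))
-- ===== SOURCE B (Python) =====
-- def MatchesMask(hex6, mask):
--     hex6 = hex6.upper().lstrip('#')
--     mask = mask.upper().lstrip('#')
--     if len(hex6) != 6 or len(mask) != 6:
--         return False
--
--     def go(hs, ms):
--         if not hs:
--             return True
--         h, m = hs[0], ms[0]
--         if m == 'X':
--             ok = '0' <= h <= '9' or 'A' <= h <= 'F'
--         elif m == 'H':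
--             ok = '8' <= h <= '9' or 'A' <= h <= 'F'
--         else:
--             ok = h == m
--         return ok and go(hs[1:], ms[1:])
--
--     return go(hex6, mask)
-- ===== Notes on version B (the rewrite author's own statement) =====
-- stated objective: alternative
-- what changed: Replaced the zip+all generator with a classifier helper doing string-membership tests by a direct pairwise recursion over both strings using chained code-point range comparisons instead of membership in hex-digit strings.
import Mathlib
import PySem

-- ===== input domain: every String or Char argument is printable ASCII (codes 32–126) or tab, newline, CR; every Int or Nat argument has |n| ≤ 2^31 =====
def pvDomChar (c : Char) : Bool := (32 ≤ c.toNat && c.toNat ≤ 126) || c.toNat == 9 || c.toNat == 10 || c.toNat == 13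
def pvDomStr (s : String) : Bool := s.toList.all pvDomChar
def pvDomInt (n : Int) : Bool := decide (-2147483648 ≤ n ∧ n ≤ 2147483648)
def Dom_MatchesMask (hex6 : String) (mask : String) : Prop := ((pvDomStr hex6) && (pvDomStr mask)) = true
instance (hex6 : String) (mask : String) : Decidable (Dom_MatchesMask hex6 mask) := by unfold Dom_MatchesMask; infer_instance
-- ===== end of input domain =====

-- B replaces A's zip+all generator (with its string-membership classifier) by a direct
-- pairwise recursion over both strings using chained code-point range comparisons;
-- same cost, different structure.

-- ===== PORT A =====
-- s.lstrip('#') on the list side: drop leading '#' characters (exact: lstrip with a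
-- one-character set drops exactly the leading occurrences of that character).
def pvLstripHash (s : List Char) : List Char := s.dropWhile (fun c => c == '#')

-- the inner helper ok(h, m); 'h in <str>' is PySem.Chars.isIn on the constant's chars
def pvOkA (h m : Char) : Bool :=
  if m == 'X' then
    PySem.Chars.isIn [h] ['0','1','2','3','4','5','6','7','8','9','A','B','C','D','E','F']
  else if m == 'H' then
    PySem.Chars.isIn [h] ['8','9','A','B','C','D','E','F']
  else h == m

def MatchesMask (hex6 : String) (mask : String) : Bool :=
  let h := pvLstripHash (PySem.Chars.upper hex6.toList)
  let m := pvLstripHash (PySem.Chars.upper mask.toList)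
  if h.length ≠ 6 ∨ m.length ≠ 6 then false
  else (h.zip m).all (fun p => pvOkA p.1 p.2)

-- ===== PORT B =====
-- go(hs, ms): pairwise recursion with early exit; chained char comparisons
def pvGoB : List Char → List Char → Bool
  | [], _ => true
  | h :: hs, m :: ms =>
      let ok :=
        if m == 'X' then (decide ('0' ≤ h) && decide (h ≤ '9')) || (decide ('A' ≤ h) && decide (h ≤ 'F'))
        else if m == 'H' then (decide ('8' ≤ h) && decide (h ≤ '9')) || (decide ('A' ≤ h) && decide (h ≤ 'F'))
        else h == m
      ok && pvGoB hs ms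
  | _ :: _, [] => false   -- unreachable in Source B: go is only called on equal-length strings

def MatchesMask_alt (hex6 : String) (mask : String) : Bool :=
  let h := pvLstripHash (PySem.Chars.upper hex6.toList)
  let m := pvLstripHash (PySem.Chars.upper mask.toList)
  if h.length ≠ 6 ∨ m.length ≠ 6 then false
  else pvGoB h m

-- ===== PRECONDITION & SPEC =====
def Spec_MatchesMask (hex6 : String) (mask : String) (out : Bool) : Prop := out = MatchesMask_alt hex6 mask
instance (hex6 : String) (mask : String) (out : Bool) : Decidable (Spec_MatchesMask hex6 mask out) := by unfold Spec_MatchesMask; infer_instance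

-- ===== CLAIM (what is proved, stated in full; the proofs are below) =====
def Claim_equal_MatchesMask : Prop := ∀ (hex6 : String) (mask : String), Dom_MatchesMask hex6 mask → Spec_MatchesMask hex6 mask (MatchesMask hex6 mask)

-- ===== LEMMAS AND PROOFS =====

theorem pvChar_eq_toNat (a b : Char) : a = b ↔ a.toNat = b.toNat := by
  rw [Char.ext_iff, ← UInt32.toNat_inj]; rfl

theorem pvChar_le_toNat (a b : Char) : a ≤ b ↔ a.toNat ≤ b.toNat := by
  rw [Char.le_def, UInt32.le_iff_toNat_le]; rfl

theorem pvSingleton_infix_iff (a : Char) (l : List Char) : [a] <:+: l ↔ a ∈ l := by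
  constructor
  · intro hi; exact List.singleton_sublist.1 hi.sublist
  · intro hm
    obtain ⟨s, t, rfl⟩ := List.append_of_mem hm
    exact ⟨s, t, by simp⟩

-- pointwise: A's membership classifier equals B's range tests, for every pair of characters
theorem pvOk_eq (h m : Char) :
    pvOkA h m =
      (if m == 'X' then (decide ('0' ≤ h) && decide (h ≤ '9')) || (decide ('A' ≤ h) && decide (h ≤ 'F'))
       else if m == 'H' then (decide ('8' ≤ h) && decide (h ≤ '9')) || (decide ('A' ≤ h) && decide (h ≤ 'F'))
       else h == m) := by
  unfold pvOkA
  split_ifs <;> (try rfl) <;>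
  · rw [Bool.eq_iff_iff, PySem.Chars.isIn_iff_infix, pvSingleton_infix_iff]
    simp only [Bool.or_eq_true, Bool.and_eq_true, decide_eq_true_eq, List.mem_cons,
      List.not_mem_nil, or_false, pvChar_eq_toNat, pvChar_le_toNat,
      show ('0').toNat = 48 from rfl, show ('1').toNat = 49 from rfl, show ('2').toNat = 50 from rfl,
      show ('3').toNat = 51 from rfl, show ('4').toNat = 52 from rfl, show ('5').toNat = 53 from rfl,
      show ('6').toNat = 54 from rfl, show ('7').toNat = 55 from rfl, show ('8').toNat = 56 from rfl,
      show ('9').toNat = 57 from rfl, show ('A').toNat = 65 from rfl, show ('B').toNat = 66 from rfl,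
      show ('C').toNat = 67 from rfl, show ('D').toNat = 68 from rfl, show ('E').toNat = 69 from rfl,
      show ('F').toNat = 70 from rfl]
    omega

-- the zip+all loop equals the pairwise recursion when the lists have equal length
theorem pvAll_eq_go (hs ms : List Char) (hlen : hs.length = ms.length) :
    ((hs.zip ms).all (fun p => pvOkA p.1 p.2)) = pvGoB hs ms := by
  induction hs generalizing ms with
  | nil => cases ms <;> simp [pvGoB]
  | cons h hs ih =>
      cases ms with
      | nil => simp at hlen
      | cons m ms =>
          simp only [List.zip_cons_cons, List.all_cons, pvGoB]
          rw [pvOk_eq, ih ms (by simpa using hlen)]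

-- ===== VERDICT (by name: the statement is the Claim_ definition above) =====
theorem MatchesMask_spec : Claim_equal_MatchesMask := by
  intro hex6 mask _
  unfold Spec_MatchesMask MatchesMask MatchesMask_alt
  set h := pvLstripHash (PySem.Chars.upper hex6.toList) with hh
  set m := pvLstripHash (PySem.Chars.upper mask.toList) with hm
  by_cases hc : h.length ≠ 6 ∨ m.length ≠ 6
  · simp only [if_pos hc]
  · simp only [if_neg hc]
    rw [not_or, not_not, not_not] at hc
    exact pvAll_eq_go h m (by omega)
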